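-- pv_equiv track=rewrite | github.com/GenericName192/python-stuff | Reddit_challenges/Challenge_two/nonogram_challenge_two.py | nonogram_sorter
-- ===== SOURCE A (Python) =====
-- def nonogram_sorter(nonogram: str):
--     sortednonogram = nonogram.replace(" ", "")
--     sortednonogram = sortednonogram.split("\n")
--     temp_list = []
--     return_list = []
--     number_tracker = 0
--     for lists in sortednonogram:
--
--         for chars in lists:
--
--             if chars == "1":
--                 number_tracker += 1
--
--             else:
--                 if number_tracker:
--                     temp_list.append(number_tracker)
--                     number_tracker = 0
--
--         if number_tracker:
--             temp_list.append(number_tracker)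
--             number_tracker = 0
--
--         return_list.append(temp_list)
--         temp_list = []
--     return return_list
-- ===== SOURCE B (Python) =====
-- def nonogram_sorter(nonogram: str):
--     return_list = []
--     for line in nonogram.replace(" ", "").split("\n"):
--         masked = "".join(c if c == "1" else " " for c in line)
--         return_list.append([len(word) for word in masked.split()])
--     return return_list
-- ===== Notes on version B (the rewrite author's own statement) =====
-- stated objective: idiomatic
-- what changed: The per-character state machine (running counter flushed on non-'1' and at line end) is replaced by masking non-'1' chars to spaces and taking the lengths of whitespace-split words per line.
import Mathlib
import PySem

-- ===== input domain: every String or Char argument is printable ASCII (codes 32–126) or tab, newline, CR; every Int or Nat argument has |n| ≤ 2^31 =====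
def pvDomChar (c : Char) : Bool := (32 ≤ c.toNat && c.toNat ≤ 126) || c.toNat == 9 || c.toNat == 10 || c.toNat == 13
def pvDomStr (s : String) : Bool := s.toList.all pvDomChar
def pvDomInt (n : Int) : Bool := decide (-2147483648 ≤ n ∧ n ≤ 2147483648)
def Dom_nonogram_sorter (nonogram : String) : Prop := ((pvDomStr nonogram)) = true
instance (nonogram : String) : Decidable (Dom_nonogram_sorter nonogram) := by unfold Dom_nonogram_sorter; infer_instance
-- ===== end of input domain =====

-- B replaces A's per-character counter state machine by masking non-'1' chars to spaces and
-- measuring the whitespace-split words of each line (idiomatic, same cost).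

-- ===== PORT A =====
-- inner loop body: if chars == "1": number_tracker += 1  else: if number_tracker: flush
def pvAStep (st : List Int × Int) (c : Char) : List Int × Int :=
  if c = '1' then (st.1, st.2 + 1)
  else if st.2 ≠ 0 then (st.1 ++ [st.2], 0) else st

-- after the inner loop: if number_tracker: temp_list.append(number_tracker); number_tracker = 0
def pvAFlush (p : List Int × Int) : List Int × Int :=
  if p.2 ≠ 0 then (p.1 ++ [p.2], 0) else p

-- outer loop body: run the inner loop, flush, append temp_list, reset temp_list
def pvALine (st : List (List Int) × List Int × Int) (line : String) :
    List (List Int) × List Int × Int :=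
  let q := pvAFlush (line.toList.foldl pvAStep (st.2.1, st.2.2))
  (st.1 ++ [q.1], [], q.2)

def nonogram_sorter (nonogram : String) : List (List Int) :=
  let sortednonogram := PySem.Str.replace nonogram " " ""
  let lines := (PySem.Str.split? sortednonogram "\n").getD []   -- sep "\n" ≠ "", never none
  (lines.foldl pvALine ([], [], 0)).1

-- ===== PORT B =====
-- "".join(c if c == "1" else " " for c in line) over single characters is exactly
-- the string of the per-character mapped list
def nonogram_sorter_alt (nonogram : String) : List (List Int) :=
  ((PySem.Str.split? (PySem.Str.replace nonogram " " "") "\n").getD []).map (fun line =>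
    (PySem.Str.split₀
        (String.ofList (line.toList.map (fun c => if c = '1' then c else ' ')))).map
      (fun w => PySem.Str.len w))

-- ===== PRECONDITION & SPEC =====
def Spec_nonogram_sorter (nonogram : String) (out : List (List Int)) : Prop := out = nonogram_sorter_alt nonogram
instance (nonogram : String) (out : List (List Int)) : Decidable (Spec_nonogram_sorter nonogram out) := by unfold Spec_nonogram_sorter; infer_instance

-- ===== CLAIM (what is proved, stated in full; the proofs are below) =====
def Claim_equal_nonogram_sorter : Prop := ∀ (nonogram : String), Dom_nonogram_sorter nonogram → Spec_nonogram_sorter nonogram (nonogram_sorter nonogram)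

-- ===== LEMMAS AND PROOFS =====

theorem pv_go_acc (s cur : List Char) (acc : List (List Char)) :
    PySem.Chars.split₀.go s cur acc = acc.reverse ++ PySem.Chars.split₀.go s cur [] := by
  induction s generalizing cur acc with
  | nil =>
    simp only [PySem.Chars.split₀.go]
    by_cases h : cur.isEmpty <;> simp [h]
  | cons c rest ih =>
    simp only [PySem.Chars.split₀.go]
    by_cases hs : PySem.Chars.isspace c
    · by_cases h : cur.isEmpty
      · simp only [hs, h, if_true]
        exact ih [] acc
      · simp only [hs, h, if_true, Bool.false_eq_true, if_false]
        rw [ih [] (cur.reverse :: acc), ih [] [cur.reverse]]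
        simp
    · simp only [hs, Bool.false_eq_true, if_false]
      exact ih (c :: cur) acc

-- the per-line invariant: A's inner loop + flush equals lengths of split₀ runs of the masked line
theorem pv_line (l : List Char) (temp : List Int) (cur : List Char) :
    (pvAFlush (l.foldl pvAStep (temp, (cur.length : Int)))).1
    = temp ++ (PySem.Chars.split₀.go (l.map (fun c => if c = '1' then c else ' ')) cur []).map
        (fun w => (w.length : Int)) := by
  induction l generalizing temp cur with
  | nil =>
    simp only [List.foldl, List.map, PySem.Chars.split₀.go, pvAFlush]
    by_cases h : cur.isEmpty
    · simp [List.isEmpty_iff.mp h]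
    · have h0 : cur.length ≠ 0 := by
        simpa [List.isEmpty_iff, List.length_eq_zero_iff] using h
      have h0' : (cur.length : Int) ≠ 0 := by exact_mod_cast h0
      have hnil : cur ≠ [] := by simpa [List.length_eq_zero_iff] using h0
      simp [h, hnil]
  | cons c rest ih =>
    by_cases hc : c = '1'
    · subst hc
      have h1 : PySem.Chars.isspace '1' = false := by decide
      simp only [List.foldl, List.map, pvAStep, PySem.Chars.split₀.go, h1,
        Bool.false_eq_true, if_false, if_true]
      have : ((cur.length : Int) + 1) = ((('1' :: cur).length : Nat) : Int) := by
        simp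
      rw [this, ih temp ('1' :: cur)]
    · have hm : (if c = '1' then c else ' ') = ' ' := by simp [hc]
      have hs : PySem.Chars.isspace ' ' = true := by decide
      by_cases h0 : cur = []
      · subst h0
        simp only [List.foldl, List.map, pvAStep, hc, if_false, List.length_nil,
          Nat.cast_zero, ne_eq, not_true_eq_false, PySem.Chars.split₀.go, hs,
          if_true, List.isEmpty_nil]
        have := ih temp []
        simpa using this
      · have hne : (cur.length : Int) ≠ 0 := by
          simpa [List.length_eq_zero_iff] using h0
        have hemp : cur.isEmpty = false := by simpa [List.isEmpty_iff] using h0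
        simp only [List.foldl, List.map, pvAStep, hc, if_false,
          PySem.Chars.split₀.go, hs, hemp, Bool.false_eq_true]
        rw [if_pos hne]
        rw [pv_go_acc (rest.map fun c => if c = '1' then c else ' ') [] [cur.reverse]]
        have := ih (temp ++ [(cur.length : Int)]) []
        simp only [List.length_nil, Nat.cast_zero] at this
        rw [this]
        simp

-- the flushed counter is always back to zero
theorem pv_flush2 (p : List Int × Int) : (pvAFlush p).2 = 0 := by
  unfold pvAFlush; split <;> simp_all

-- B's per-line value, at the character level
theorem pv_alt_line (line : String) :
    ((PySem.Str.split₀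
        (String.ofList (line.toList.map (fun c => if c = '1' then c else ' ')))).map
      (fun w => PySem.Str.len w))
    = (PySem.Chars.split₀.go (line.toList.map (fun c => if c = '1' then c else ' ')) [] []).map
        (fun w => ((w.length : Nat) : Int)) := by
  have h := PySem.Str.split₀_map_toList
    (String.ofList (line.toList.map (fun c => if c = '1' then c else ' ')))
  simp only [PySem.Chars.split₀, String.toList_ofList] at h
  rw [← h, List.map_map]
  simp [Function.comp, PySem.Str.len]

-- the outer loop: A's foldl over the lines appends exactly B's per-line lists
theorem pv_outer (lines : List String) (acc : List (List Int)) :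
    (lines.foldl pvALine (acc, [], 0)).1
    = acc ++ lines.map (fun line =>
        (PySem.Str.split₀
            (String.ofList (line.toList.map (fun c => if c = '1' then c else ' ')))).map
          (fun w => PySem.Str.len w)) := by
  induction lines generalizing acc with
  | nil => simp
  | cons line rest ih =>
    have hq1 : (pvAFlush (line.toList.foldl pvAStep ([], 0))).1
        = (PySem.Str.split₀
            (String.ofList (line.toList.map (fun c => if c = '1' then c else ' ')))).map
          (fun w => PySem.Str.len w) := by
      have := pv_line line.toList [] []
      simp only [List.length_nil, Nat.cast_zero] at this
      rw [this, pv_alt_line line]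
      simp
    have hst : pvALine (acc, [], 0) line
        = (acc ++ [(PySem.Str.split₀
            (String.ofList (line.toList.map (fun c => if c = '1' then c else ' ')))).map
          (fun w => PySem.Str.len w)], [], 0) := by
      simp only [pvALine, hq1, pv_flush2]
    rw [List.foldl_cons, hst, ih]
    simp

-- ===== VERDICT (by name: the statement is the Claim_ definition above) =====
theorem nonogram_sorter_spec : Claim_equal_nonogram_sorter := by
  intro nonogram _
  unfold Spec_nonogram_sorter nonogram_sorter nonogram_sorter_alt
  simpa using pv_outer ((PySem.Str.split? (PySem.Str.replace nonogram " " "") "\n").getD []) []
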